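-- pv_equiv track=rewrite | github.com/teejaydub/grids | constraints/factoring.py | factorizations
-- ===== SOURCE A (Python) =====
-- def hashInts(ints):
--   """ Return a hashable that uniquely represents a list of integers.
--       >>> hashInts([1, 2, 5])
--       '1_2_5'
--       >>> hashInts([2])
--       '2'
--   """
--   return '_'.join([str(x) for x in ints])
--
-- def factorizations(n, m):
--   """ Yield each combination of ways to multiply m integers to make n.
--       >>> list(factorizations(1, 1))
--       [[1]]
--       >>> list(factorizations(2, 1))
--       [[2]]
--       >>> list(factorizations(2, 2))
--       [[1, 2]]
--       >>> list(factorizations(4, 2))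
--       [[1, 4], [2, 2]]
--       >>> list(factorizations(50, 3))
--       [[1, 1, 50], [1, 2, 25], [1, 5, 10], [2, 5, 5]]
--   """
--   if n == 1:
--     yield m * [1]
--   elif m == 1:
--     yield [n]
--
--   # Pull off every even factor we can.
--   else:
--     # Filter out repeats.
--     seen = set()
--     for i in range(1, n + 1):
--       if n % i == 0:
--         remainder = n // i
--         for rest in factorizations(remainder, m - 1):
--           combo = sorted([i] + rest)
--           # Yield combo, but only if we haven't yet.
--           h = hashInts(combo)
--           if h not in seen:
--             seen.add(h)
--             yield combo
-- ===== SOURCE B (Python) =====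
-- def factorizations(n, m):
--   """ Yield each combination of ways to multiply m integers to make n.
--       Same results as the original, but generates only non-decreasing factor
--       sequences directly (divisors bounded by the m-th root), so no dedup set
--       and no full 1..n scan at every level.
--   """
--   if n == 1:
--     yield m * [1]
--   elif m == 1:
--     yield [n]
--   else:
--     yield from _nondecreasing(n, m, 1)
--
-- def _nondecreasing(n, m, lo):
--   """ Yield, in lexicographic order, the non-decreasing lists of m integers,
--       all >= lo, whose product is n. """
--   if m == 1:
--     yield [n]
--   else:
--     d = lo
--     while d ** m <= n:
--       if n % d == 0:
--         for rest in _nondecreasing(n // d, m - 1, d):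
--           yield [d] + rest
--       d += 1
-- ===== Notes on version B (the rewrite author's own statement) =====
-- stated objective: faster
-- what changed: Instead of scanning all i in 1..n at every level and deduplicating sorted permutations through a seen-set of string hashes, B recursively generates only non-decreasing factor sequences over divisors d bounded by d**m <= n, so every combination is produced exactly once, already sorted, in the same lexicographic order, with no dedup set and no full 1..n scan.
import Mathlib
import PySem

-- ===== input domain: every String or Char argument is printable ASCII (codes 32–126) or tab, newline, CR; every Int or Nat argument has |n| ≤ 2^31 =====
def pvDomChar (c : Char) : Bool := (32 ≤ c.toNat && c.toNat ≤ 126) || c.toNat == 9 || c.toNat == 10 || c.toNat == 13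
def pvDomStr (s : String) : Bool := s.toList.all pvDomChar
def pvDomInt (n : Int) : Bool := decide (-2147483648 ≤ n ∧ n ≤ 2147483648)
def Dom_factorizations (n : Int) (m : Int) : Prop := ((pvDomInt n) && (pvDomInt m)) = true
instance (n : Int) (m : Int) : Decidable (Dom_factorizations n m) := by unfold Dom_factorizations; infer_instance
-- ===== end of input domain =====

-- B replaces A's full 1..n scan with string-hash permutation dedup by a recursion that
-- generates only non-decreasing factor sequences over divisors d with d^m ≤ n (faster in a timing run).


-- ===== PORT A =====
-- hashInts: '_'.join([str(x) for x in ints])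
def hashInts (ints : List Int) : String :=
  PySem.Str.join "_" (ints.map PySem.Int.toStr)

-- body of A's inner 'for rest in factorizations(remainder, m-1)' loop (combo/hash/seen logic verbatim)
def facAInnerStep (i : Int) (st : PySem.Set String × List (List Int)) (rest : List Int) :
    PySem.Set String × List (List Int) :=
  let combo := PySem.List.sorted (i :: rest) (fun x => x) false
  let h := hashInts combo
  if PySem.Set.contains st.1 h then st else (PySem.Set.add st.1 h, st.2 ++ [combo])

-- A as a generator, collected into a list; fuel makes the recursion total in Lean:
-- fuel m.toNat+1 suffices on Pre_ (each recursive call decreases m by 1 down to m = 1);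
-- outside Pre_ (n ≥ 2 ∧ m ≤ 0) the Python recurses forever and nothing is claimed.
def facA (fuel : Nat) (n : Int) (m : Int) : List (List Int) :=
  match fuel with
  | 0 => []
  | f+1 =>
    if n = 1 then [List.replicate m.toNat 1]          -- yield m * [1]
    else if m = 1 then [[n]]                          -- yield [n]
    else
      ((PySem.List.pyRange 1 (n+1) 1).foldl           -- for i in range(1, n + 1)
        (fun st i =>
          if PySem.Int.mod n i = 0 then               -- if n % i == 0
            (facA f (PySem.Int.floordiv n i) (m-1)).foldl (facAInnerStep i) st
          else st)
        (PySem.Set.empty, [])).2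

def factorizations (n : Int) (m : Int) : List (List Int) := facA (m.toNat + 1) n m

-- ===== PORT B =====
-- _nondecreasing(n, m, lo): while d ** m <= n ported as takeWhile over range(lo, n+1)
-- (exact: the while loop's d never exceeds n on inputs where the loop body runs, since d^m ≤ n, m ≥ 1, d ≥ 1);
-- fuel as for A.
def genB (fuel : Nat) (n : Int) (m : Int) (lo : Int) : List (List Int) :=
  match fuel with
  | 0 => []
  | f+1 =>
    if m = 1 then [[n]]
    else
      (((PySem.List.pyRange lo (n+1) 1).takeWhile (fun d => decide (d ^ m.toNat ≤ n))).foldl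
        (fun out d =>
          if PySem.Int.mod n d = 0 then
            out ++ (genB f (PySem.Int.floordiv n d) (m-1) d).map (fun r => d :: r)
          else out)
        [])

def factorizations_alt (n : Int) (m : Int) : List (List Int) :=
  if n = 1 then [List.replicate m.toNat 1]
  else if m = 1 then [[n]]
  else genB (m.toNat + 1) n m 1

-- ===== PRECONDITION & SPEC =====
-- Pre_ excludes exactly the inputs n ≥ 2 ∧ m ≤ 0, on which A recurses forever (RecursionError);
-- A returns normally on every other input.
def Pre_factorizations (n : Int) (m : Int) : Prop := n ≤ 1 ∨ 1 ≤ m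
instance (n : Int) (m : Int) : Decidable (Pre_factorizations n m) := by
  unfold Pre_factorizations; infer_instance
def pvWitness_factorizations : Int × Int := (50, 3)

def Spec_factorizations (n : Int) (m : Int) (out : List (List Int)) : Prop := out = factorizations_alt n m
instance (n : Int) (m : Int) (out : List (List Int)) : Decidable (Spec_factorizations n m out) := by
  unfold Spec_factorizations; infer_instance

-- ===== CLAIM (what is proved, stated in full; the proofs are below) =====
def Claim_equal_factorizations : Prop := ∀ (n : Int) (m : Int), Dom_factorizations n m → Pre_factorizations n m → Spec_factorizations n m (factorizations n m)

-- ===== LEMMAS AND PROOFS =====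

-- ---- products of bounded lists ----
lemma pv_pow_le_prod (l : List Int) (a : Int) (ha : 1 ≤ a) (h : ∀ x ∈ l, a ≤ x) :
    a ^ l.length ≤ l.prod := by
  induction l with
  | nil => simp
  | cons x xs ih =>
    simp only [List.length_cons, List.prod_cons, pow_succ]
    have hx : a ≤ x := h x (by simp)
    have hxs : a ^ xs.length ≤ xs.prod := ih (fun y hy => h y (by simp [hy]))
    have h1 : (1:Int) ≤ a ^ xs.length := one_le_pow₀ ha
    calc a ^ xs.length * a ≤ a ^ xs.length * x := by nlinarith
      _ ≤ xs.prod * x := by nlinarith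
      _ = x * xs.prod := by ring

lemma pv_one_le_prod (l : List Int) (h : ∀ x ∈ l, (1:Int) ≤ x) : 1 ≤ l.prod := by
  have := pv_pow_le_prod l 1 le_rfl h
  simpa using this

-- ---- injectivity of hashInts on equal-length lists ----
lemma pv_digitChar_inj (a b : Nat) (ha : a < 10) (hb : b < 10)
    (h : Nat.digitChar a = Nat.digitChar b) : a = b := by
  interval_cases a <;> interval_cases b <;> simp_all [Nat.digitChar]

lemma pv_toDigits_inj (a b : Nat) (h : Nat.toDigits 10 a = Nat.toDigits 10 b) : a = b := by
  induction a using Nat.strong_induction_on generalizing b with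
  | _ a ih =>
    rw [Nat.toDigits_eq_if (b := 10) (n := a) (by norm_num),
        Nat.toDigits_eq_if (b := 10) (n := b) (by norm_num)] at h
    by_cases h1 : a < 10 <;> by_cases h2 : b < 10 <;> simp only [h1, h2, if_pos, if_false] at h
    · exact pv_digitChar_inj a b h1 h2 (by simpa using h)
    · exfalso
      have hl := congrArg List.length h
      have hp : 0 < (Nat.toDigits 10 (b/10)).length := Nat.length_toDigits_pos
      simp only [List.length_cons, List.length_append, List.length_nil] at hl; omega
    · exfalso
      have hl := congrArg List.length h
      have hp : 0 < (Nat.toDigits 10 (a/10)).length := Nat.length_toDigits_pos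
      simp only [List.length_cons, List.length_append, List.length_nil] at hl; omega
    · have := List.append_inj' h (by simp)
      obtain ⟨hq, hr⟩ := this
      have hdiv : a / 10 = b / 10 := ih (a/10) (by omega) _ hq
      have hmod : a % 10 = b % 10 :=
        pv_digitChar_inj _ _ (Nat.mod_lt _ (by norm_num)) (Nat.mod_lt _ (by norm_num))
          (by simpa using hr)
      omega

lemma pv_underscore_not_mem_toChars (n : Int) : '_' ∉ PySem.Int.toChars n := by
  unfold PySem.Int.toChars
  split_ifs with h
  · intro hmem
    rcases List.mem_cons.mp hmem with h1 | h1
    · exact absurd h1 (by decide)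
    · have := Nat.isDigit_of_mem_toDigits (by norm_num) (by norm_num) h1
      simp [Char.isDigit] at this
  · intro hmem
    have := Nat.isDigit_of_mem_toDigits (by norm_num) (by norm_num) hmem
    simp [Char.isDigit] at this

lemma pv_toChars_inj (a b : Int) (h : PySem.Int.toChars a = PySem.Int.toChars b) : a = b := by
  unfold PySem.Int.toChars at h
  split_ifs at h with h1 h2 h2
  · simp only [List.cons.injEq, true_and] at h
    have := pv_toDigits_inj _ _ h
    omega
  · exfalso
    have : '-' ∈ Nat.toDigits 10 b.toNat := h ▸ List.mem_cons_self ..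
    have := Nat.isDigit_of_mem_toDigits (by norm_num) (by norm_num) this
    simp [Char.isDigit] at this
  · exfalso
    have : '-' ∈ Nat.toDigits 10 a.toNat := h ▸ List.mem_cons_self ..
    have := Nat.isDigit_of_mem_toDigits (by norm_num) (by norm_num) this
    simp [Char.isDigit] at this
  · have := pv_toDigits_inj _ _ h
    omega

lemma pv_split_underscore (s1 : List Char) : ∀ (s2 : List Char) (t1 t2 : List Char), '_' ∉ s1 → '_' ∉ s2 →
    s1 ++ '_' :: t1 = s2 ++ '_' :: t2 → s1 = s2 ∧ t1 = t2 := by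
  induction s1 with
  | nil =>
    intro s2 t1 t2 _ h2 h
    cases s2 with
    | nil => simpa using h
    | cons c s2' =>
      exfalso
      simp only [List.nil_append, List.cons_append, List.cons.injEq] at h
      exact h2 (h.1 ▸ List.mem_cons_self ..)
  | cons c s1' ih =>
    intro s2 t1 t2 h1 h2 h
    cases s2 with
    | nil =>
      exfalso
      simp only [List.nil_append, List.cons_append, List.cons.injEq] at h
      exact h1 (h.1 ▸ List.mem_cons_self ..)
    | cons d s2' =>
      simp only [List.cons_append, List.cons.injEq] at h
      obtain ⟨rfl, h⟩ := h
      have := ih s2' t1 t2 (fun hx => h1 (List.mem_cons_of_mem _ hx))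
        (fun hx => h2 (List.mem_cons_of_mem _ hx)) h
      exact ⟨by rw [this.1], this.2⟩

lemma pv_join_inj (ps : List (List Char)) : ∀ (qs : List (List Char)), ps.length = qs.length →
    (∀ p ∈ ps, '_' ∉ p) → (∀ q ∈ qs, '_' ∉ q) →
    PySem.Chars.join ['_'] ps = PySem.Chars.join ['_'] qs → ps = qs := by
  induction ps with
  | nil => intro qs hlen _ _ _; cases qs with
    | nil => rfl
    | cons q qs' => simp at hlen
  | cons p ps' ih =>
    intro qs hlen hp hq h
    cases qs with
    | nil => simp at hlen
    | cons q qs' =>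
      cases ps' with
      | nil =>
        cases qs' with
        | nil => simpa [PySem.Chars.join_singleton] using h
        | cons q2 qs2 => simp at hlen
      | cons p2 ps2 =>
        cases qs' with
        | nil => simp at hlen
        | cons q2 qs2 =>
          rw [PySem.Chars.join_cons_cons, PySem.Chars.join_cons_cons] at h
          simp only [List.append_assoc, List.singleton_append] at h
          obtain ⟨hpq, hrest⟩ := pv_split_underscore p q _ _
            (hp p (by simp)) (hq q (by simp)) h
          have := ih (q2 :: qs2) (by simpa using hlen)
            (fun x hx => hp x (List.mem_cons_of_mem _ hx))
            (fun x hx => hq x (List.mem_cons_of_mem _ hx)) hrest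
          rw [hpq, this]

lemma pv_hashInts_inj (c1 c2 : List Int) (hlen : c1.length = c2.length)
    (h : hashInts c1 = hashInts c2) : c1 = c2 := by
  have h' := congrArg String.toList h
  unfold hashInts at h'
  rw [PySem.Str.toList_join, PySem.Str.toList_join] at h'
  simp only [List.map_map] at h'
  have hsep : ("_" : String).toList = ['_'] := rfl
  rw [hsep] at h'
  have hmaps := pv_join_inj (c1.map (String.toList ∘ PySem.Int.toStr)) (c2.map (String.toList ∘ PySem.Int.toStr))
    (by simp [hlen])
    (by intro p hp
        obtain ⟨x, _, rfl⟩ := List.mem_map.mp hp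
        simpa [PySem.Int.toList_toStr] using pv_underscore_not_mem_toChars x)
    (by intro p hp
        obtain ⟨x, _, rfl⟩ := List.mem_map.mp hp
        simpa [PySem.Int.toList_toStr] using pv_underscore_not_mem_toChars x)
    h'
  clear h h'
  induction c1 generalizing c2 with
  | nil => cases c2 with
    | nil => rfl
    | cons y ys => simp at hlen
  | cons x xs ih =>
    cases c2 with
    | nil => simp at hlen
    | cons y ys =>
      simp only [List.map_cons, List.cons.injEq, Function.comp_apply] at hmaps
      obtain ⟨hxy, hrest⟩ := hmaps
      have hx : x = y := pv_toChars_inj x y (by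
        rw [← PySem.Int.toList_toStr, ← PySem.Int.toList_toStr]; exact hxy)
      exact hx ▸ congrArg _ (ih ys (by simpa using hlen) hrest)

-- ---- list shape helpers ----
lemma pv_flatMap_filter {α β : Type} (p : α → Bool) (g : α → List β) (l : List α) :
    (l.filter p).flatMap g = l.flatMap (fun d => if p d then g d else []) := by
  induction l with
  | nil => simp
  | cons x xs ih =>
    by_cases hx : p x <;> simp [hx, ih]

lemma pv_filter_flatMap {α β : Type} (q : β → Bool) (g : α → List β) (l : List α) :
    (l.flatMap g).filter q = l.flatMap (fun d => (g d).filter q) := by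
  induction l with
  | nil => simp
  | cons x xs ih => simp [List.flatMap_cons, List.filter_append, ih]

-- takeWhile = filter for the monotone bound d^k ≤ n on an increasing range
lemma pv_takeWhile_pow (k : Nat) (n : Int) : ∀ (b lo : Int), 1 ≤ lo →
    (PySem.List.pyRange lo b 1).takeWhile (fun d => decide (d ^ k ≤ n)) =
    (PySem.List.pyRange lo b 1).filter (fun d => decide (d ^ k ≤ n)) := by
  intro b
  suffices H : ∀ (fuel : Nat) (lo : Int), (b - lo).toNat ≤ fuel → 1 ≤ lo →
      (PySem.List.pyRange lo b 1).takeWhile (fun d => decide (d ^ k ≤ n)) =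
      (PySem.List.pyRange lo b 1).filter (fun d => decide (d ^ k ≤ n)) by
    intro lo hlo; exact H (b - lo).toNat lo le_rfl hlo
  intro fuel
  induction fuel with
  | zero =>
    intro lo hf _
    rw [PySem.List.pyRange_one_eq_nil (by omega)]; rfl
  | succ f ih =>
    intro lo hf hlo
    by_cases hb : b ≤ lo
    · rw [PySem.List.pyRange_one_eq_nil hb]; rfl
    · rw [PySem.List.pyRange_one_cons (by omega)]
      by_cases hp : lo ^ k ≤ n
      · rw [List.takeWhile_cons, List.filter_cons]
        simp only [hp, decide_true, if_true]
        rw [ih (lo+1) (by omega) (by omega)]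
      · have hnil : List.filter (fun d => decide (d ^ k ≤ n)) (PySem.List.pyRange (lo+1) b 1) = [] := by
          rw [List.filter_eq_nil_iff]
          intro d hd
          have hdmem := PySem.List.mem_pyRange_one.mp hd
          have : lo ^ k ≤ d ^ k := pow_le_pow_left₀ (by omega) (by omega) k
          simp; omega
        rw [List.takeWhile_cons, List.filter_cons, hnil]
        simp [hp]

lemma pv_genB_aux {β : Type} (g : Int → List β) (n : Int) (T : List Int) (acc : List β) :
    T.foldl (fun out d => if PySem.Int.mod n d = 0 then out ++ g d else out) acc =
    acc ++ T.flatMap (fun d => if PySem.Int.mod n d = 0 then g d else []) := by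
  rw [PySem.List.foldl_congr_mem T _ (fun out d => out ++ (if PySem.Int.mod n d = 0 then g d else [])) acc
    (by intro acc2 x _; by_cases h : PySem.Int.mod n x = 0 <;> simp [h])]
  exact PySem.List.foldl_append_eq_flatMap _ T acc

-- genB in flatMap form (m ≥ 2, one unfolding)
lemma pv_genB_flatMap (f : Nat) (n m lo : Int) (hm : m ≠ 1) (hlo : 1 ≤ lo) :
    genB (f+1) n m lo =
    (PySem.List.pyRange lo (n+1) 1).flatMap
      (fun d => if PySem.Int.mod n d = 0 ∧ d ^ m.toNat ≤ n then
          (genB f (PySem.Int.floordiv n d) (m-1) d).map (fun r => d :: r)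
        else []) := by
  rw [genB]
  simp only [hm, if_false]
  rw [pv_takeWhile_pow _ n _ lo hlo,
    pv_genB_aux (fun d => (genB f (PySem.Int.floordiv n d) (m-1) d).map (fun r => d :: r)) n _ [],
    pv_flatMap_filter]
  rw [List.nil_append]
  apply List.flatMap_congr  -- maybe wrong name
  intro d _
  by_cases h1 : PySem.Int.mod n d = 0 <;> by_cases h2 : d ^ m.toNat ≤ n <;> simp [h1, h2]

-- ---- genB characterization ----
lemma pv_mem_genB (m : Int) (hm : 1 ≤ m) : ∀ (n lo : Int) (r : List Int), 1 ≤ lo →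
    lo ^ m.toNat ≤ n →
    (r ∈ genB (m.toNat + 1) n m lo ↔
      r.length = m.toNat ∧ r.prod = n ∧ r.Pairwise (· ≤ ·) ∧ ∀ x ∈ r, lo ≤ x) := by
  induction m, hm using Int.le_induction with
  | base =>
    intro n lo r hlo hpow
    have ht : (1:Int).toNat = 1 := rfl
    rw [ht] at hpow ⊢
    rw [genB]
    simp only [if_true, List.mem_singleton]
    constructor
    · rintro rfl
      refine ⟨rfl, by simp, by simp, ?_⟩
      intro x hx
      simp at hx; subst hx
      simpa using hpow
    · rintro ⟨hlen, hprod, _, _⟩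
      match r, hlen with
      | [x], _ => simp at hprod ⊢; omega
  | succ m hm1 ih =>
    intro n lo r hlo hpow
    have hk : (m+1).toNat = m.toNat + 1 := by omega
    have hne : m + 1 ≠ 1 := by omega
    rw [hk]
    rw [pv_genB_flatMap (m.toNat + 1) n (m+1) lo hne hlo]
    rw [hk]
    simp only [List.mem_flatMap]
    constructor
    · rintro ⟨d, hd, hr⟩
      have hdr := PySem.List.mem_pyRange_one.mp hd
      have hd1 : 1 ≤ d := by omega
      split_ifs at hr with hcond
      · obtain ⟨hmod, hdpow⟩ := hcond
        obtain ⟨rest, hrest, rfl⟩ := List.mem_map.mp hr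
        have hdvd : d ∣ n := (PySem.Int.mod_eq_zero_iff_dvd n d).mp hmod
        have hq : PySem.Int.floordiv n d = n / d := PySem.Int.floordiv_eq_ediv_of_pos (by omega)
        have hnd : d * (n / d) = n := Int.mul_ediv_cancel' hdvd
        have hdq : d ^ m.toNat ≤ n / d := by
          have : d ^ m.toNat * d ≤ (n/d) * d := by
            rw [← pow_succ]
            nlinarith [hnd]
          exact le_of_mul_le_mul_right this (by omega)
        have hsub : m + 1 - 1 = m := by ring
        rw [hsub, hq] at hrest
        have := (ih (n/d) d rest hd1 hdq).mp hrest
        obtain ⟨hlen, hprod, hpair, hge⟩ := this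
        refine ⟨by simp [hlen], by simp [hprod]; linarith [hnd], ?_, ?_⟩
        · rw [List.pairwise_cons]
          exact ⟨hge, hpair⟩
        · intro x hx
          rcases List.mem_cons.mp hx with rfl | hx
          · omega
          · have := hge x hx; omega
      · simp at hr
    · rintro ⟨hlen, hprod, hpair, hge⟩
      match r with
      | [] => simp at hlen
      | a :: rest =>
        have ha_lo : lo ≤ a := hge a (by simp)
        have ha1 : (1:Int) ≤ a := by omega
        have hrge : ∀ x ∈ rest, a ≤ x := (List.pairwise_cons.mp hpair).1
        have hrge1 : ∀ x ∈ rest, (1:Int) ≤ x := fun x hx => le_trans ha1 (hrge x hx)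
        have hrlen : rest.length = m.toNat := by simpa using hlen
        have hrprod : a * rest.prod = n := by simpa using hprod
        have hrpow : a ^ m.toNat ≤ rest.prod := by
          have := pv_pow_le_prod rest a ha1 hrge
          rwa [hrlen] at this
        have hprodpos : 1 ≤ rest.prod := pv_one_le_prod rest hrge1
        have hdvd : a ∣ n := ⟨rest.prod, hrprod.symm⟩
        have hapow : a ^ (m.toNat + 1) ≤ n := by
          rw [pow_succ]
          calc a ^ m.toNat * a = a * a ^ m.toNat := by ring
            _ ≤ a * rest.prod := by nlinarith
            _ = n := hrprod
        have han : a ≤ n := by nlinarith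
        refine ⟨a, PySem.List.mem_pyRange_one.mpr ⟨ha_lo, by omega⟩, ?_⟩
        have hmod : PySem.Int.mod n a = 0 := (PySem.Int.mod_eq_zero_iff_dvd n a).mpr hdvd
        rw [if_pos ⟨hmod, hapow⟩]
        rw [List.mem_map]
        refine ⟨rest, ?_, rfl⟩
        have hq : PySem.Int.floordiv n a = n / a := PySem.Int.floordiv_eq_ediv_of_pos (by omega)
        have hqe : n / a = rest.prod := by
          rw [← hrprod]
          exact Int.mul_ediv_cancel_left _ (by omega)
        have hsub : m + 1 - 1 = m := by ring
        rw [hsub, hq, hqe]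
        exact (ih rest.prod a rest ha1 (hqe ▸ hrpow.trans (le_of_eq hqe.symm) )).mpr
          ⟨hrlen, rfl, (List.pairwise_cons.mp hpair).2, hrge⟩

lemma pv_nodup_genB (m : Int) (hm : 1 ≤ m) : ∀ (n lo : Int), 1 ≤ lo →
    (genB (m.toNat + 1) n m lo).Nodup := by
  induction m, hm using Int.le_induction with
  | base =>
    intro n lo _
    rw [genB]
    simp
  | succ m hm1 ih =>
    intro n lo hlo
    have hk : (m+1).toNat = m.toNat + 1 := by omega
    rw [hk, pv_genB_flatMap (m.toNat + 1) n (m+1) lo (by omega) hlo]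
    rw [List.nodup_flatMap]
    constructor
    · intro d hd
      have hdr := PySem.List.mem_pyRange_one.mp hd
      split_ifs with hc
      · apply List.Nodup.map (fun a b hab => by simpa using hab)
        have hsub : m + 1 - 1 = m := by ring
        rw [hsub]
        exact ih _ d (by omega)
      · exact List.nodup_nil
    · have hpw : (PySem.List.pyRange lo (n+1) 1).Pairwise (· < ·) :=
        PySem.List.pairwise_lt_pyRange_one lo (n+1)
      refine hpw.imp_of_mem ?_
      intro d1 d2 h1 h2 hlt r hr1 hr2
      simp only at hr1 hr2
      split_ifs at hr1 hr2 <;> simp_all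
      · obtain ⟨r1, -, hr1e⟩ := hr1
        obtain ⟨r2, -, hr2e⟩ := hr2
        rw [← hr1e] at hr2e
        simp at hr2e
        omega

lemma pv_genB_filter (m : Int) (hm : 1 ≤ m) (n i : Int) (hi : 1 ≤ i)
    (hpow : i ^ m.toNat ≤ n) :
    genB (m.toNat + 1) n m i =
    (genB (m.toNat + 1) n m 1).filter (fun r => decide (i ≤ r.headI)) := by
  by_cases hm1 : m = 1
  · subst hm1
    have hpow' : i ≤ n := by simpa using hpow
    rw [genB, genB]
    simp [hpow']
  · have hin : i ≤ n := by
      calc i = i ^ 1 := (pow_one i).symm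
        _ ≤ i ^ m.toNat := pow_le_pow_right₀ hi (by omega)
        _ ≤ n := hpow
    rw [pv_genB_flatMap m.toNat n m i hm1 hi, pv_genB_flatMap m.toNat n m 1 hm1 (by norm_num)]
    rw [pv_filter_flatMap]
    rw [PySem.List.pyRange_one_append 1 i (n+1) hi (by omega)]
    rw [List.flatMap_append]
    have h1 : (PySem.List.pyRange 1 i 1).flatMap
        (fun d => ((if PySem.Int.mod n d = 0 ∧ d ^ m.toNat ≤ n then
          (genB m.toNat (PySem.Int.floordiv n d) (m-1) d).map (fun r => d :: r)
        else []).filter (fun r => decide (i ≤ r.headI)))) = [] := by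
      rw [List.flatMap_eq_nil_iff]
      intro d hd
      have hdr := PySem.List.mem_pyRange_one.mp hd
      split_ifs with hc
      · rw [List.filter_eq_nil_iff]
        intro r hr
        obtain ⟨rest, -, rfl⟩ := List.mem_map.mp hr
        simp
        omega
      · rfl
    have h2 : ∀ d ∈ PySem.List.pyRange i (n+1) 1,
        ((if PySem.Int.mod n d = 0 ∧ d ^ m.toNat ≤ n then
          (genB m.toNat (PySem.Int.floordiv n d) (m-1) d).map (fun r => d :: r)
        else []).filter (fun r => decide (i ≤ r.headI))) =
        (if PySem.Int.mod n d = 0 ∧ d ^ m.toNat ≤ n then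
          (genB m.toNat (PySem.Int.floordiv n d) (m-1) d).map (fun r => d :: r)
        else []) := by
      intro d hd
      have hdr := PySem.List.mem_pyRange_one.mp hd
      split_ifs with hc
      · rw [List.filter_eq_self]
        intro r hr
        obtain ⟨rest, -, rfl⟩ := List.mem_map.mp hr
        simp
        omega
      · rfl
    rw [h1, List.nil_append]
    exact (List.flatMap_congr h2).symm

lemma pv_genB_one (m : Int) (hm : 1 ≤ m) : genB (m.toNat + 1) 1 m 1 = [List.replicate m.toNat 1] := by
  induction m, hm using Int.le_induction with
  | base => rw [genB]; simp
  | succ m hm1 ih =>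
    have hk : (m+1).toNat = m.toNat + 1 := by omega
    rw [hk, pv_genB_flatMap (m.toNat + 1) 1 (m+1) 1 (by omega) le_rfl]
    have hr : PySem.List.pyRange 1 2 1 = [1] := by decide
    norm_num
    rw [hr]
    simp only [List.flatMap_cons, List.flatMap_nil, List.append_nil]
    have hc : PySem.Int.mod 1 1 = 0 ∧ (1:Int) ^ (m+1).toNat ≤ 1 := by
      constructor
      · decide
      · simp
    rw [if_pos hc]
    have hfd : PySem.Int.floordiv 1 1 = 1 := by decide
    rw [hfd, ih]
    simp [List.replicate_succ]

-- ---- inner loop of A: seen-set dedup over one divisor i ----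
lemma pv_inner_fold (i : Int) (K : Nat) (hK : 1 ≤ K) :
    ∀ (L : List (List Int)) (O : List (List Int)),
    L.Nodup →
    (∀ c ∈ O, c.length = K) →
    (∀ r ∈ L, r.length = K - 1) →
    (∀ r ∈ L, i ≤ r.headI →
      PySem.List.sorted (i :: r) (fun x => x) false = i :: r ∧ (i :: r) ∉ O) →
    (∀ r ∈ L, ¬ i ≤ r.headI → PySem.List.sorted (i :: r) (fun x => x) false ∈ O) →
    L.foldl (facAInnerStep i) (O.map hashInts, O) =
      ((O ++ (L.filter (fun r => decide (i ≤ r.headI))).map (fun r => i :: r)).map hashInts,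
        O ++ (L.filter (fun r => decide (i ≤ r.headI))).map (fun r => i :: r)) := by
  intro L
  induction L with
  | nil => intro O _ _ _ _ _; simp
  | cons rest L' ih =>
    intro O hnodup hlenO hlenL hkeep hdrop
    rw [List.foldl_cons]
    by_cases hge : i ≤ rest.headI
    · obtain ⟨hsorted, hnotin⟩ := hkeep rest (by simp) hge
      have hcombo_len : (i :: rest).length = K := by
        have := hlenL rest (by simp); simp [this]; omega
      have hnotmem : hashInts (i :: rest) ∉ O.map hashInts := by
        intro hmem
        obtain ⟨c, hc, hch⟩ := List.mem_map.mp hmem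
        have : c = i :: rest := pv_hashInts_inj c (i :: rest) (by rw [hlenO c hc, hcombo_len]) hch
        exact hnotin (this ▸ hc)
      have hstep : facAInnerStep i (O.map hashInts, O) rest =
          ((O ++ [i :: rest]).map hashInts, O ++ [i :: rest]) := by
        unfold facAInnerStep
        rw [hsorted]
        simp only
        rw [if_neg (by simpa [PySem.Set.contains_iff] using hnotmem)]
        rw [PySem.Set.add_of_not_mem hnotmem]
        simp
      rw [hstep]
      have hres := ih (O ++ [i :: rest]) (List.Nodup.of_cons hnodup)
        (by intro c hc
            rcases List.mem_append.mp hc with h | h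
            · exact hlenO c h
            · simp at h; subst h; exact hcombo_len)
        (fun r hr => hlenL r (by simp [hr]))
        (by intro r hr hge'
            obtain ⟨hs, hn⟩ := hkeep r (by simp [hr]) hge'
            refine ⟨hs, ?_⟩
            intro hmem
            rcases List.mem_append.mp hmem with h | h
            · exact hn h
            · simp at h
              have : r = rest := by simpa using h
              exact (List.nodup_cons.mp hnodup).1 (this ▸ hr))
        (by intro r hr hlt
            exact List.mem_append_left _ (hdrop r (by simp [hr]) hlt))
      rw [hres]
      rw [List.filter_cons_of_pos (by simpa using hge)]
      simp
    · have hmem : PySem.List.sorted (i :: rest) (fun x => x) false ∈ O :=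
        hdrop rest (by simp) hge
      have hstep : facAInnerStep i (O.map hashInts, O) rest = (O.map hashInts, O) := by
        unfold facAInnerStep
        simp only
        rw [if_pos]
        rw [PySem.Set.contains_iff]
        exact List.mem_map_of_mem hmem
      rw [hstep]
      have hres := ih O (List.Nodup.of_cons hnodup)
        hlenO
        (fun r hr => hlenL r (by simp [hr]))
        (fun r hr hge' => hkeep r (by simp [hr]) hge')
        (fun r hr hlt => hdrop r (by simp [hr]) hlt)
      rw [hres]
      rw [List.filter_cons_of_neg (by simpa using hge)]

-- ---- main equivalence ----
lemma pv_main (m : Int) (hm : 1 ≤ m) : ∀ n : Int, 1 ≤ n →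
    facA (m.toNat + 1) n m = genB (m.toNat + 1) n m 1 := by
  induction m, hm using Int.le_induction with
  | base =>
    intro n hn
    rw [facA, genB]
    by_cases hn1 : n = 1
    · subst hn1; simp
    · simp [hn1]
  | succ m hm1 ih =>
    intro n hn
    have hk : (m+1).toNat = m.toNat + 1 := by omega
    have hne1 : m + 1 ≠ 1 := by omega
    have hm1e : m + 1 - 1 = m := by ring
    by_cases hn1 : n = 1
    · subst hn1
      rw [facA]
      norm_num
      have hone := pv_genB_one (m+1) (by omega)
      rw [hk] at hone
      rw [hk, hone]
    · -- main case: n ≥ 2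
      have hn2 : 2 ≤ n := by omega
      set blockf : Int → List (List Int) := fun d =>
        if PySem.Int.mod n d = 0 ∧ d ^ (m+1).toNat ≤ n then
          (genB ((m+1).toNat) (PySem.Int.floordiv n d) (m + 1 - 1) d).map (fun r => d :: r)
        else [] with hblockf
      have factO : ∀ (b : Int) (c : List Int), c ∈ (PySem.List.pyRange 1 b 1).flatMap blockf →
          ∃ d t, 1 ≤ d ∧ d < b ∧ c = d :: t ∧ t.length = m.toNat ∧ (∀ x ∈ t, d ≤ x) := by
        intro b c hc
        obtain ⟨d, hd, hcd⟩ := List.mem_flatMap.mp hc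
        have hdr := PySem.List.mem_pyRange_one.mp hd
        rw [hblockf] at hcd
        simp only at hcd
        split_ifs at hcd with hcond
        · obtain ⟨hmod, hpow⟩ := hcond
          obtain ⟨t, ht, rfl⟩ := List.mem_map.mp hcd
          rw [hm1e, hk] at ht
          have hdvd : d ∣ n := (PySem.Int.mod_eq_zero_iff_dvd n d).mp hmod
          have hfd : PySem.Int.floordiv n d = n / d := PySem.Int.floordiv_eq_ediv_of_pos (by omega)
          have hnd : d * (n / d) = n := Int.mul_ediv_cancel' hdvd
          have hdq : d ^ m.toNat ≤ n / d := by
            have h1 : d ^ m.toNat * d ≤ (n/d) * d := by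
              rw [← pow_succ, ← hk]; nlinarith [hnd]
            exact le_of_mul_le_mul_right h1 (by omega)
          rw [hfd] at ht
          have := (pv_mem_genB m hm1 (n/d) d t (by omega) hdq).mp ht
          exact ⟨d, t, by omega, by omega, rfl, this.1, this.2.2.2⟩
        · simp at hcd
      -- per-divisor blocks compose with A's dedup loop
      have OC : ∀ (j : Nat) (b : Int), b = 1 + (j : Int) → b ≤ n + 1 →
          (PySem.List.pyRange 1 b 1).foldl
            (fun st i =>
              if PySem.Int.mod n i = 0 then
                (facA ((m+1).toNat) (PySem.Int.floordiv n i) (m + 1 - 1)).foldl (facAInnerStep i) st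
              else st)
            (PySem.Set.empty, []) =
          (((PySem.List.pyRange 1 b 1).flatMap blockf).map hashInts,
            (PySem.List.pyRange 1 b 1).flatMap blockf) := by
        intro j
        induction j with
        | zero =>
          intro b hb _
          have : b = 1 := by omega
          subst this
          rw [PySem.List.pyRange_one_eq_nil le_rfl]
          rfl
        | succ jj ihj =>
          intro b hb hble
          have hb1 : b - 1 = 1 + (jj : Int) := by push_cast at hb ⊢; omega
          have hsp : PySem.List.pyRange 1 b 1 = PySem.List.pyRange 1 (b-1) 1 ++ [b-1] := by
            have h := PySem.List.pyRange_one_succ_right (a := 1) (b := b-1) (by omega)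
            have hbb : b - 1 + 1 = b := by ring
            rw [hbb] at h
            exact h
          set i : Int := b - 1 with hi
          have hige : 1 ≤ i := by omega
          have hin : i ≤ n := by omega
          rw [hsp, List.foldl_append, List.flatMap_append]
          rw [ihj (b-1) hb1 (by omega)]
          simp only [List.foldl_cons, List.foldl_nil, List.flatMap_cons, List.flatMap_nil,
            List.append_nil]
          set O : List (List Int) := (PySem.List.pyRange 1 (b-1) 1).flatMap blockf with hO
          by_cases hmod : PySem.Int.mod n i = 0
          · -- divisor: run the inner loop
            have hdvd : i ∣ n := (PySem.Int.mod_eq_zero_iff_dvd n i).mp hmod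
            have hfd : PySem.Int.floordiv n i = n / i := PySem.Int.floordiv_eq_ediv_of_pos (by omega)
            have hni : i * (n / i) = n := Int.mul_ediv_cancel' hdvd
            have hq1 : 1 ≤ n / i := by
              rw [Int.le_ediv_iff_mul_le (by omega : (0:Int) < i)]; omega
            have hLrw : facA ((m+1).toNat) (PySem.Int.floordiv n i) (m + 1 - 1) =
                genB (m.toNat + 1) (n / i) m 1 := by
              rw [hm1e, hfd, hk]; exact ih (n / i) hq1
            rw [if_pos hmod, hLrw]
            set L : List (List Int) := genB (m.toNat + 1) (n / i) m 1 with hL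
            have hmemL : ∀ r ∈ L, r.length = m.toNat ∧ r.prod = n / i ∧
                r.Pairwise (· ≤ ·) ∧ ∀ x ∈ r, 1 ≤ x := by
              intro r hr
              exact (pv_mem_genB m hm1 (n/i) 1 r le_rfl (by simpa using hq1)).mp hr
            have hfold := pv_inner_fold i (m.toNat + 1) (by omega) L O
              (pv_nodup_genB m hm1 (n/i) 1 le_rfl)
              (by intro c hc
                  obtain ⟨d, t, _, _, rfl, htl, _⟩ := factO (b-1) c hc
                  simp [htl])
              (by intro r hr; simp [(hmemL r hr).1])
              (by -- keep case
                  intro r hr hge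
                  obtain ⟨hlen, hprod, hpair, hpos⟩ := hmemL r hr
                  cases r with
                  | nil => simp at hlen; omega
                  | cons x t =>
                    simp only [List.headI] at hge
                    have hallr : ∀ y ∈ x :: t, i ≤ y := by
                      intro y hy
                      rcases List.mem_cons.mp hy with rfl | hy
                      · exact hge
                      · exact le_trans hge ((List.pairwise_cons.mp hpair).1 y hy)
                    constructor
                    · apply PySem.List.sorted_eq_self_of_pairwise
                      rw [List.pairwise_cons]
                      exact ⟨hallr, hpair⟩
                    · intro hmem
                      obtain ⟨d, t2, hd1, hdb, heq, -, -⟩ := factO (b-1) _ hmem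
                      simp only [List.cons.injEq] at heq
                      omega)
              (by -- drop case: the sorted combo was produced by an earlier divisor
                  intro r hr hlt
                  obtain ⟨hlen, hprod, hpair, hpos⟩ := hmemL r hr
                  cases r with
                  | nil => simp at hlen; omega
                  | cons x t =>
                    have hxi : x < i := by simpa using hlt
                    set combo := PySem.List.sorted (i :: x :: t) (fun y => y) false with hcombo
                    have hperm : combo.Perm (i :: x :: t) := PySem.List.sorted_perm _ _ _
                    have hcpair : combo.Pairwise (· ≤ ·) := by
                      have := PySem.List.sorted_pairwise (i :: x :: t) (fun y => y)
                      simpa using this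
                    have htlen : t.length + 1 = m.toNat := by simpa using hlen
                    have hclen : combo.length = m.toNat + 1 := by
                      rw [hperm.length_eq]; simp; omega
                    have hxmin : ∀ y ∈ i :: x :: t, x ≤ y := by
                      intro y hy
                      rcases List.mem_cons.mp hy with rfl | hy
                      · omega
                      · rcases List.mem_cons.mp hy with rfl | hy
                        · exact le_rfl
                        · exact (List.pairwise_cons.mp hpair).1 y hy
                    have hpos2 : ∀ y ∈ i :: x :: t, 1 ≤ y := by
                      intro y hy
                      rcases List.mem_cons.mp hy with rfl | hy
                      · omega
                      · exact hpos y hy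
                    cases hc2 : combo with
                    | nil => rw [hc2] at hclen; simp at hclen
                    | cons a t2 =>
                      rw [hc2] at hperm hcpair hclen
                      have hax : a = x := by
                        have hx_in : x ∈ a :: t2 := hperm.mem_iff.mpr (by simp)
                        have h1 : a ≤ x := by
                          rcases List.mem_cons.mp hx_in with heq | hx_in
                          · omega
                          · exact ((List.pairwise_cons.mp hcpair).1 x hx_in)
                        have ha_in : a ∈ i :: x :: t := hperm.mem_iff.mp (by simp)
                        have h2 : x ≤ a := hxmin a ha_in
                        omega
                      subst hax
                      have hprodc : a * t2.prod = n := by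
                        have hpp := hperm.prod_eq
                        simp only [List.prod_cons] at hpp
                        have h3 : a * t.prod = n / i := by simpa using hprod
                        rw [h3, hni] at hpp
                        exact hpp
                      have hx1 : (1:Int) ≤ a := hpos2 a (by simp)
                      have htge : ∀ y ∈ t2, a ≤ y := (List.pairwise_cons.mp hcpair).1
                      have ht2len : t2.length = m.toNat := by simpa using hclen
                      have ht2prod : t2.prod = n / a := by
                        rw [← hprodc, Int.mul_ediv_cancel_left _ (by omega)]
                      have hxpow : a ^ m.toNat ≤ t2.prod := by
                        have := pv_pow_le_prod t2 a hx1 htge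
                        rwa [ht2len] at this
                      have hxdvd : a ∣ n := ⟨t2.prod, hprodc.symm⟩
                      have hxmod : PySem.Int.mod n a = 0 := (PySem.Int.mod_eq_zero_iff_dvd n a).mpr hxdvd
                      have hxfd : PySem.Int.floordiv n a = n / a := PySem.Int.floordiv_eq_ediv_of_pos (by omega)
                      have hxpowK : a ^ (m+1).toNat ≤ n := by
                        rw [hk, pow_succ]
                        calc a ^ m.toNat * a ≤ t2.prod * a := by nlinarith
                          _ = a * t2.prod := by ring
                          _ = n := hprodc
                      rw [hO, List.mem_flatMap]
                      refine ⟨a, PySem.List.mem_pyRange_one.mpr ⟨by omega, by omega⟩, ?_⟩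
                      rw [hblockf]
                      simp only
                      rw [if_pos ⟨hxmod, hxpowK⟩]
                      rw [List.mem_map]
                      refine ⟨t2, ?_, rfl⟩
                      rw [hm1e, hxfd, hk]
                      refine (pv_mem_genB m hm1 (n/a) a t2 (by omega) (by rwa [ht2prod] at hxpow)).mpr
                        ⟨ht2len, ht2prod, (List.pairwise_cons.mp hcpair).2, htge⟩)
            rw [hfold]
            -- the kept sublist is exactly B's block for divisor i
            have hfilter : (L.filter (fun r => decide (i ≤ r.headI))).map (fun r => i :: r) = blockf i := by
              rw [hblockf]
              simp only
              by_cases hbig : i ^ (m+1).toNat ≤ n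
              · rw [if_pos ⟨hmod, hbig⟩, hm1e, hfd, hk]
                have hcancel : i ^ m.toNat ≤ n / i := by
                  have h1 : i ^ m.toNat * i ≤ (n/i) * i := by
                    rw [← pow_succ, ← hk]; nlinarith [hni]
                  exact le_of_mul_le_mul_right h1 (by omega)
                rw [hL, ← pv_genB_filter m hm1 (n/i) i hige hcancel]
              · rw [if_neg (by rintro ⟨-, h⟩; exact hbig h)]
                have : L.filter (fun r => decide (i ≤ r.headI)) = [] := by
                  rw [List.filter_eq_nil_iff]
                  intro r hr
                  obtain ⟨hlen, hprod, hpair, hpos⟩ := hmemL r hr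
                  cases r with
                  | nil => simp at hlen; omega
                  | cons x t =>
                    simp only [List.headI, decide_eq_true_eq]
                    intro hge
                    have hallr : ∀ y ∈ x :: t, i ≤ y := by
                      intro y hy
                      rcases List.mem_cons.mp hy with rfl | hy
                      · exact hge
                      · exact le_trans hge ((List.pairwise_cons.mp hpair).1 y hy)
                    have hpp : i ^ m.toNat ≤ (x :: t).prod := by
                      have := pv_pow_le_prod (x :: t) i hige hallr
                      rwa [hlen] at this
                    have : i ^ (m+1).toNat ≤ n := by
                      rw [hk, pow_succ]
                      calc i ^ m.toNat * i ≤ (x :: t).prod * i := by nlinarith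
                        _ = i * (x :: t).prod := by ring
                        _ ≤ n := by rw [hprod]; nlinarith [hni]
                    exact hbig this
                rw [this]
                rfl
            rw [hfilter]
          · rw [if_neg hmod]
            have hbe : blockf i = [] := by
              rw [hblockf]
              simp only
              rw [if_neg]
              rintro ⟨h1, -⟩
              exact hmod h1
            rw [hbe]
            simp
      -- assemble
      rw [facA]
      rw [if_neg hn1, if_neg hne1]
      have hoc := OC (n.toNat) (n+1) (by omega) le_rfl
      rw [hoc]
      rw [pv_genB_flatMap ((m+1).toNat) n (m+1) 1 hne1 le_rfl, ← hblockf]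

-- ===== VERDICT (by name: the statement is the Claim_ definition above) =====
theorem factorizations_spec : Claim_equal_factorizations := by
  intro n m _hdom hpre
  unfold Spec_factorizations factorizations factorizations_alt
  by_cases hn1 : n = 1
  · subst hn1; simp [facA]
  · by_cases hm1 : m = 1
    · subst hm1; simp [facA, hn1]
    · by_cases hn : 1 ≤ n
      · have hm : 1 ≤ m := by
          rcases hpre with h | h
          · omega
          · exact h
        rw [pv_main m hm n hn]
        simp [hn1, hm1]
      · -- n ≤ 0: both sides are []
        simp only [hn1, hm1, if_false]
        rw [facA, genB]
        simp only [hn1, hm1, if_false]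
        rw [PySem.List.pyRange_one_eq_nil (by omega)]
        simp
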